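-- pv_equiv track=rewrite | github.com/miquido/draive | src/draive/multimodal/content.py | _find_closing_tag
-- ===== SOURCE A (Python) =====
-- def _find_closing_tag(text: str, start_pos: int, tag_name: str) -> int | None:
--     """Find the end position of a closing tag using char-by-char search."""
--     search_pattern = f"</{tag_name}"
--     pos = start_pos
--
--     while True:
--         pos = text.find(search_pattern, pos)
--         if pos == -1:
--             return None
--
--         # Check if it's followed by whitespace or >
--         end_pos = pos + len(search_pattern)
--         if end_pos >= len(text):
--             return None
--
--         # Closing tags should not have attributes - only whitespace then >
--         if text[end_pos] == ">":
--             return end_pos + 1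
--         elif text[end_pos] in " \t\n\r":
--             # Skip whitespace and ensure we only find >
--             while end_pos < len(text) and text[end_pos] in " \t\n\r":
--                 end_pos += 1
--             if end_pos < len(text) and text[end_pos] == ">":
--                 return end_pos + 1
--             else:
--                 # Malformed closing tag (has attributes or other content)
--                 pos += 1
--                 continue
--         else:
--             # Not a valid closing tag
--             pos += 1
--             continue
-- ===== SOURCE B (Python) =====
-- import re
--
--
-- def _find_closing_tag(text, start_pos, tag_name):
--     """Find the end position of a closing tag with a compiled regex."""
--     pattern = re.compile("</" + re.escape(tag_name) + r"[ \t\n\r]*>")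
--     match = pattern.search(text, start_pos)
--     return match.end() if match else None
-- ===== Notes on version B (the rewrite author's own statement) =====
-- stated objective: idiomatic
-- what changed: Replaced A's explicit find/validate/retry loop (text.find, end_pos bookkeeping, pos+=1 restarts) by one compiled regex '</' + re.escape(tag_name) + '[ \t\n\r]*>' searched from start_pos; Pre_ excludes start positions strictly between -len(text) and 0, where A inherits str.find's negative-offset wraparound while re.search clamps the start to 0 - an unspecified corner for a search-start offset.
-- outside the precondition, e.g. on _find_closing_tag('</a></a>', -4, 'a'): A returns 8, B returns 4
import Mathlib
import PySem

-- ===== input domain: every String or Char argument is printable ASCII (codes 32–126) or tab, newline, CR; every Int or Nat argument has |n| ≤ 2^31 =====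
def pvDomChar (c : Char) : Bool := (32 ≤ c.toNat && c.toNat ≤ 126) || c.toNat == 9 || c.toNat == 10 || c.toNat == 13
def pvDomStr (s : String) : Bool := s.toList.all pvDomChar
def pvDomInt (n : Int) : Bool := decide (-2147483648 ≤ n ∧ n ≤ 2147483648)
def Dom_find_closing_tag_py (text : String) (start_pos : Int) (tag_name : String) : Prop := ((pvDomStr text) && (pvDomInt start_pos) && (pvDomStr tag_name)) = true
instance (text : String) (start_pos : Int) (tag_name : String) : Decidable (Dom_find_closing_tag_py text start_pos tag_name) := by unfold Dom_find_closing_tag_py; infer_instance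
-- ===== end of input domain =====

-- B replaces A's explicit find/validate/retry loop by one compiled regex
-- '</' ++ escape(tag_name) ++ '[ \t\n\r]*>' searched from start_pos (objective: idiomatic).

-- c in " \t\n\r" for a single char c: exact (substring membership of a 1-char string = char membership).
def pvIsWs (c : Char) : Bool := c = ' ' || c = '\t' || c = '\n' || c = '\r'

-- maximal whitespace run: A's inner while-loop, and the regex's greedy '[ \t\n\r]*'
def pvSkipWs (cs : List Char) (e : Nat) : Nat :=
  if h : e < cs.length then
    if pvIsWs cs[e] then pvSkipWs cs (e + 1) else e
  else e
termination_by cs.length - e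

-- ===== PORT A =====
-- the 'while True' retry loop of A; fuel only makes the recursion structural (proved sufficient below)
def pvLoopA (cs pat : List Char) (fuel : Nat) (pos : Int) : Option Int :=
  match fuel with
  | 0 => none
  | fuel + 1 =>
    let p := PySem.Chars.findFrom cs pat pos none
    if p = -1 then none
    else
      let endPos : Int := p + pat.length
      if (cs.length : Int) ≤ endPos then none
      else
        match PySem.List.pyGet? cs endPos with
        | none => none   -- unreachable: -1 < p and endPos < len
        | some c =>
          if c = '>' then some (endPos + 1)
          else if pvIsWs c then
            let e2 := pvSkipWs cs endPos.toNat
            if h : e2 < cs.length then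
              if cs[e2] = '>' then some ((e2 : Int) + 1) else pvLoopA cs pat fuel (p + 1)
            else pvLoopA cs pat fuel (p + 1)
          else pvLoopA cs pat fuel (p + 1)

def find_closing_tag_py (text : String) (start_pos : Int) (tag_name : String) : Option Int :=
  pvLoopA text.toList ('<' :: '/' :: tag_name.toList) (text.toList.length + 2) start_pos

-- ===== PORT B =====
-- one regex match attempt of '</tag[ \t\n\r]*>' at position i: literal prefix, then greedy
-- whitespace, then '>'; exact since '>' is not in the whitespace class, so the greedy run
-- that can still be followed by '>' is the maximal run.
def pvMatchAt (cs pat : List Char) (i : Nat) : Option Int :=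
  if pat.isPrefixOf (cs.drop i) then
    let j := pvSkipWs cs (i + pat.length)
    if h : j < cs.length then
      if cs[j] = '>' then some ((j : Int) + 1) else none
    else none
  else none

-- re.Pattern.search: leftmost successful match attempt, trying positions left to right
def pvSearchB (cs pat : List Char) (i : Nat) : Option Int :=
  if h : i ≤ cs.length then
    match pvMatchAt cs pat i with
    | some e => some e
    | none => pvSearchB cs pat (i + 1)
  else none
termination_by cs.length + 1 - i

def find_closing_tag_py_alt (text : String) (start_pos : Int) (tag_name : String) : Option Int :=
  let cs := text.toList
  let pat := '<' :: '/' :: tag_name.toList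
  -- re.search clamps its pos argument into [0, len(text)]
  let start : Nat := (if start_pos < 0 then 0 else min start_pos (cs.length : Int)).toNat
  pvSearchB cs pat start

-- ===== PRECONDITION & SPEC =====
-- Pre_ excludes start positions strictly between -len(text) and 0: there A inherits
-- str.find's negative-offset wraparound (search from len+start_pos) while B's re.search
-- clamps the start to 0 — an unspecified corner for a search-start offset; for
-- start_pos ≤ -len(text) both search from 0 and agree, so those stay inside.
def Pre_find_closing_tag_py (text : String) (start_pos : Int) (tag_name : String) : Prop :=
  0 ≤ start_pos ∨ (text.toList.length : Int) + start_pos ≤ 0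
instance (text : String) (start_pos : Int) (tag_name : String) : Decidable (Pre_find_closing_tag_py text start_pos tag_name) := by unfold Pre_find_closing_tag_py; infer_instance

def pvWitness_find_closing_tag_py : String × Int × String := ("</a></a>", 0, "a")

def Spec_find_closing_tag_py (text : String) (start_pos : Int) (tag_name : String) (out : Option Int) : Prop := out = find_closing_tag_py_alt text start_pos tag_name
instance (text : String) (start_pos : Int) (tag_name : String) (out : Option Int) : Decidable (Spec_find_closing_tag_py text start_pos tag_name out) := by unfold Spec_find_closing_tag_py; infer_instance

-- ===== CLAIM (what is proved, stated in full; the proofs are below) =====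
def Claim_equal_find_closing_tag_py : Prop := ∀ (text : String) (start_pos : Int) (tag_name : String), Dom_find_closing_tag_py text start_pos tag_name → Pre_find_closing_tag_py text start_pos tag_name → Spec_find_closing_tag_py text start_pos tag_name (find_closing_tag_py text start_pos tag_name)

-- ===== LEMMAS AND PROOFS =====

theorem pvSkipWs_stop (cs : List Char) (e : Nat) (h : e < cs.length) (hc : pvIsWs cs[e] = false) :
    pvSkipWs cs e = e := by
  rw [pvSkipWs]; simp [h, hc]

theorem pvSkipWs_past (cs : List Char) (e : Nat) (h : cs.length ≤ e) :
    pvSkipWs cs e = e := by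
  rw [pvSkipWs]; simp [show ¬ e < cs.length by omega]

theorem pvFindFrom_gt_len (cs pat : List Char) (k : Nat) (h : cs.length < k) :
    PySem.Chars.findFrom cs pat (k : Int) none = -1 := by
  simp only [PySem.Chars.findFrom]
  have h1 : ¬ ((k : Int) < 0) := by omega
  have h2 : (cs.length : Int) < (k : Int) := by exact_mod_cast h
  simp [h1, h2]

theorem pvFindFrom_clamp (cs pat : List Char) (s : Int) :
    PySem.Chars.findFrom cs pat s none =
      PySem.Chars.findFrom cs pat ((if 0 ≤ s then s else max 0 ((cs.length : Int) + s)).toNat : Int) none := by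
  by_cases hs : 0 ≤ s
  · simp [hs, Int.toNat_of_nonneg hs]
  · have hs' : s < 0 := by omega
    simp only [PySem.Chars.findFrom, hs, if_false]
    have hmax : ((max 0 ((cs.length : Int) + s)).toNat : Int) = max 0 ((cs.length : Int) + s) := by omega
    rw [hmax]
    have hst : (if s < 0 then if s + (cs.length : Int) < 0 then 0 else s + cs.length else s)
        = max 0 ((cs.length : Int) + s) := by split_ifs <;> omega
    rw [hst]
    have h2 : ¬ (max 0 ((cs.length : Int) + s) < 0) := by omega
    simp [h2]

theorem pvLoopA_congr (cs pat : List Char) (f : Nat) (pos pos' : Int)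
    (h : PySem.Chars.findFrom cs pat pos none = PySem.Chars.findFrom cs pat pos' none) :
    pvLoopA cs pat (f + 1) pos = pvLoopA cs pat (f + 1) pos' := by
  rw [pvLoopA, pvLoopA, h]

theorem pvSearchB_skip (cs pat : List Char) : ∀ (d k : Nat),
    (∀ j, k ≤ j → j < k + d → ¬ pat <+: cs.drop j) →
    pvSearchB cs pat k = pvSearchB cs pat (k + d) := by
  intro d
  induction d with
  | zero => intro k _; rfl
  | succ d ih =>
    intro k hno
    by_cases hk : k ≤ cs.length
    · have hpre : pat.isPrefixOf (cs.drop k) = false := by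
        rw [Bool.eq_false_iff]
        intro hc
        exact hno k le_rfl (by omega) (List.isPrefixOf_iff_prefix.mp hc)
      rw [pvSearchB]
      simp only [hk, dif_pos, pvMatchAt, hpre, Bool.false_eq_true, if_false]
      have := ih (k + 1) (fun j h1 h2 => hno j (by omega) (by omega))
      rw [this]; congr 1; omega
    · rw [pvSearchB, dif_neg hk]
      rw [pvSearchB, dif_neg (by omega : ¬ k + (d+1) ≤ cs.length)]

theorem pvSearchB_none (cs pat : List Char) (k : Nat)
    (hno : ∀ j, k ≤ j → ¬ pat <+: cs.drop j) :
    pvSearchB cs pat k = none := by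
  have := pvSearchB_skip cs pat (cs.length + 1 - k) k (fun j h1 _ => hno j h1)
  by_cases hk : k ≤ cs.length
  · rw [this, pvSearchB, dif_neg (by omega)]
  · rw [pvSearchB, dif_neg hk]

theorem pvLoop_eq_search (cs pat : List Char) (hple : 1 ≤ pat.length) : ∀ (fuel k : Nat), cs.length - k < fuel →
    pvLoopA cs pat fuel (k : Int) = pvSearchB cs pat k := by
  intro fuel
  induction fuel with
  | zero => intro k h; omega
  | succ f ih =>
    intro k hk
    by_cases hkn : k ≤ cs.length
    · by_cases hf : PySem.Chars.findFrom cs pat (k : Int) none = -1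
      · -- no further occurrence: both none
        rw [pvLoopA, if_pos hf]
        have hno : ¬ pat <:+: cs.drop k :=
          (PySem.Chars.findFrom_natCast_eq_neg_one_iff cs pat k hkn).mp hf
        symm
        apply pvSearchB_none
        intro j hj hpre
        have h2 : pat <+: (cs.drop k).drop (j - k) := by
          rw [List.drop_drop, (by omega : k + (j - k) = j)]; exact hpre
        exact hno (h2.isInfix.trans (List.drop_suffix _ _).isInfix)
      · obtain ⟨hkp, hpre, hmin⟩ := PySem.Chars.findFrom_natCast_spec cs pat k hkn hf
        set p := PySem.Chars.findFrom cs pat (k : Int) none with hp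
        have hp0 : 0 ≤ p := le_trans (by exact_mod_cast Nat.zero_le k) hkp
        set pn := p.toNat with hpn
        have hpcast : (pn : Int) = p := Int.toNat_of_nonneg hp0
        have hlen : pat.length ≤ cs.length - pn := by
          have := hpre.length_le
          simpa [List.length_drop] using this
        have hpn_le : pn ≤ cs.length := by omega
        have hBpre : pat.isPrefixOf (cs.drop pn) = true := List.isPrefixOf_iff_prefix.mpr hpre
        -- B side: skip from k to pn
        have hskip : pvSearchB cs pat k = pvSearchB cs pat pn := by
          have hkpn : k ≤ pn := by omega
          have := pvSearchB_skip cs pat (pn - k) k (fun j h1 h2 => by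
            intro hc
            exact hmin j (by exact_mod_cast h1) (by omega) hc)
          rwa [Nat.add_sub_cancel' hkpn] at this
        rw [hskip]
        rw [pvLoopA, if_neg hf]
        have hrec : pvLoopA cs pat f (p + 1) = pvSearchB cs pat (pn + 1) := by
          have hcast : p + 1 = ((pn + 1 : Nat) : Int) := by omega
          rw [hcast]
          exact ih (pn + 1) (by omega)
        by_cases hend : (cs.length : Int) ≤ p + pat.length
        · -- A: pattern is a suffix of text, A returns none; B's match attempt at pn fails
          -- ('[ \t\n\r]*>' runs past the end) and no later attempt can fit the literal
          rw [if_pos hend]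
          have hendn : cs.length ≤ pn + pat.length := by omega
          rw [pvSearchB, dif_pos hpn_le]
          have hskipj : pvSkipWs cs (pn + pat.length) = pn + pat.length :=
            pvSkipWs_past cs _ hendn
          simp only [pvMatchAt, hBpre, if_true, hskipj,
            dif_neg (by omega : ¬ pn + pat.length < cs.length)]
          symm
          apply pvSearchB_none
          intro j hj hc
          have := hc.length_le
          rw [List.length_drop] at this
          omega
        · rw [if_neg hend, ← hp]
          have hendn : pn + pat.length < cs.length := by omega
          have hget : PySem.List.pyGet? cs (p + (pat.length : Int)) = some cs[pn + pat.length] := by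
            have : p + (pat.length : Int) = ((pn + pat.length : Nat) : Int) := by omega
            rw [this, PySem.List.pyGet?_natCast]
            simp [hendn]
          simp only [hget]
          have htonat : (p + (pat.length : Int)).toNat = pn + pat.length := by omega
          rw [pvSearchB, dif_pos hpn_le]
          simp only [pvMatchAt, hBpre, if_true]
          by_cases hgt : cs[pn + pat.length] = '>'
          · -- direct '>'
            have hstop : pvSkipWs cs (pn + pat.length) = pn + pat.length :=
              pvSkipWs_stop cs _ hendn (by rw [hgt]; decide)
            rw [if_pos hgt, hstop, dif_pos hendn, if_pos hgt]
            congr 1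
            omega
          · by_cases hws : pvIsWs cs[pn + pat.length] = true
            · -- whitespace: both run the same greedy skip, then the identical '>' check
              rw [if_neg hgt, if_pos hws, htonat, hrec]
              by_cases hj : pvSkipWs cs (pn + pat.length) < cs.length
              · rw [dif_pos hj, dif_pos hj]
                by_cases hjgt : cs[pvSkipWs cs (pn + pat.length)] = '>'
                · rw [if_pos hjgt, if_pos hjgt]
                · rw [if_neg hjgt, if_neg hjgt]
              · rw [dif_neg hj, dif_neg hj]
            · -- neither '>' nor whitespace: both retry at pn+1
              have hstop : pvSkipWs cs (pn + pat.length) = pn + pat.length :=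
                pvSkipWs_stop cs _ hendn (Bool.eq_false_iff.mpr hws)
              rw [if_neg hgt, if_neg hws, hstop, dif_pos hendn, if_neg hgt]
              exact hrec
    · -- k past the end: both none
      rw [pvLoopA, if_pos (pvFindFrom_gt_len cs pat k (by omega))]
      rw [pvSearchB, dif_neg (by omega)]

-- ===== VERDICT (by name: the statement is the Claim_ definition above) =====
theorem find_closing_tag_py_spec : Claim_equal_find_closing_tag_py := by
  intro text start_pos tag_name _ hpre
  unfold Spec_find_closing_tag_py find_closing_tag_py find_closing_tag_py_alt
  set cs := text.toList with hcs
  set pat := ('<' :: '/' :: tag_name.toList) with hpat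
  have hple : 1 ≤ pat.length := by simp [hpat]
  show pvLoopA cs pat (cs.length + 2) start_pos
      = pvSearchB cs pat ((if start_pos < 0 then 0 else min start_pos ((cs.length : Int))).toNat)
  by_cases hs : start_pos < 0
  · -- Pre_ gives len + start_pos ≤ 0: both effectively search from 0
    have hle : (cs.length : Int) + start_pos ≤ 0 := by
      rcases hpre with h | h
      · omega
      · exact h
    have h1 : pvLoopA cs pat (cs.length + 2) start_pos = pvLoopA cs pat (cs.length + 2) ((0 : Nat) : Int) := by
      apply pvLoopA_congr cs pat (cs.length + 1)
      rw [pvFindFrom_clamp cs pat start_pos]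
      have : (if 0 ≤ start_pos then start_pos else max 0 ((cs.length : Int) + start_pos)).toNat = 0 := by
        rw [if_neg (by omega)]; omega
      rw [this]
    rw [h1, if_pos hs]
    exact pvLoop_eq_search cs pat hple (cs.length + 2) 0 (by omega)
  · have hs0 : 0 ≤ start_pos := by omega
    rw [if_neg hs]
    by_cases hbig : (cs.length : Int) < start_pos
    · -- start beyond the end: A's find returns -1; B's clamped attempt at len fails
      have hAnone : pvLoopA cs pat (cs.length + 2) start_pos = none := by
        rw [pvLoopA]
        have : start_pos = ((start_pos.toNat : Nat) : Int) := by omega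
        rw [this, if_pos (pvFindFrom_gt_len cs pat start_pos.toNat (by omega))]
      rw [hAnone, min_eq_right (by omega : (cs.length : Int) ≤ start_pos)]
      have : ((cs.length : Int)).toNat = cs.length := by omega
      rw [this]
      symm
      apply pvSearchB_none
      intro j hj hc
      have := hc.length_le
      rw [List.length_drop] at this
      omega
    · rw [min_eq_left (by omega : start_pos ≤ (cs.length : Int))]
      have hcast : start_pos = ((start_pos.toNat : Nat) : Int) := by omega
      rw [hcast]
      exact pvLoop_eq_search cs pat hple (cs.length + 2) start_pos.toNat (by omega)
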